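-- pv_equiv track=rewrite | github.com/yht0827/coding-test | Eunleelee/2024-02/2월 22일/옹알이(1).py | solution
-- ===== SOURCE A (Python) =====
-- def solution(babbling):
--     possible = ["aya", "ye", "woo", "ma"]
--     answer = 0
--     child = ''
--
--     for sounds in babbling:
--         child = ''
--         for sound in sounds:
--             child += sound
--             if child in possible:
--                 child = ''
--         if len(child) == 0:
--             answer += 1
--     return answer
-- ===== SOURCE B (Python) =====
-- def solution(babbling):
--     words = ("aya", "ye", "woo", "ma")
--
--     def ok(s):
--         while s:
--             for w in words:
--                 if s.startswith(w):
--                     s = s[len(w):]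
--                     break
--             else:
--                 return False
--         return True
--
--     return sum(1 for s in babbling if ok(s))
-- ===== Notes on version B (the rewrite author's own statement) =====
-- stated objective: alternative
-- what changed: Replaces A's char-by-char accumulate-and-reset scan (building a growing buffer and clearing it whenever it equals a word) with a word-level matcher that repeatedly strips a whole leading word off the string, counting matches with sum over a generator.
import Mathlib
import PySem

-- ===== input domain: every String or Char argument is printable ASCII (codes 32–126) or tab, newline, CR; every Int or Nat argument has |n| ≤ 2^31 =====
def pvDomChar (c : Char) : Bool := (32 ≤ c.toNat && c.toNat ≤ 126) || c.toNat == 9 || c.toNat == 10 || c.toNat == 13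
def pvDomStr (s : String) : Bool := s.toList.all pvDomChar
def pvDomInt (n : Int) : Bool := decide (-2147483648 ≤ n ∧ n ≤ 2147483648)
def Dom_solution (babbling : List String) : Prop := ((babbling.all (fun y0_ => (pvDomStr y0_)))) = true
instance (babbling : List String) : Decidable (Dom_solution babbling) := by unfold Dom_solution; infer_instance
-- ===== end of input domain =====

-- B replaces A's char-by-char accumulate-and-reset scan with a token-prefix-stripping
-- matcher (objective: alternative decomposition, same cost).

-- ===== PORT A =====
-- one step of A's inner loop: child += sound; if child in possible: child = ''
def stepA (child : List Char) (c : Char) : List Char :=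
  let n := child ++ [c]
  if n ∈ [['a','y','a'], ['y','e'], ['w','o','o'], ['m','a']] then [] else n

def solution (babbling : List String) : Int :=
  babbling.foldl
    (fun answer sounds =>
      if (sounds.toList.foldl stepA []).length = 0 then answer + 1 else answer) 0

-- ===== PORT B =====
-- B's ok(s): repeatedly strip a leading word ("aya" | "ye" | "woo" | "ma"), in that order
def okB : List Char → Bool
  | [] => true
  | c :: rest =>
    if (c :: rest).take 3 = ['a','y','a'] then okB ((c :: rest).drop 3)
    else if (c :: rest).take 2 = ['y','e'] then okB ((c :: rest).drop 2)
    else if (c :: rest).take 3 = ['w','o','o'] then okB ((c :: rest).drop 3)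
    else if (c :: rest).take 2 = ['m','a'] then okB ((c :: rest).drop 2)
    else false
termination_by s => s.length
decreasing_by all_goals (simp [List.length_drop]; try omega)

def solution_alt (babbling : List String) : Int :=
  ((babbling.filter (fun s => okB s.toList)).length : Int)

-- ===== PRECONDITION & SPEC =====
def Spec_solution (babbling : List String) (out : Int) : Prop := out = solution_alt babbling
instance (babbling : List String) (out : Int) : Decidable (Spec_solution babbling out) := by unfold Spec_solution; infer_instance

-- ===== CLAIM (what is proved, stated in full; the proofs are below) =====
def Claim_equal_solution : Prop := ∀ (babbling : List String), Dom_solution babbling → Spec_solution babbling (solution babbling)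

-- ===== LEMMAS AND PROOFS =====

-- all proper-or-improper prefixes of the four words: the "live" accumulator states
def P : List (List Char) :=
  [[], ['a'], ['a','y'], ['a','y','a'], ['y'], ['y','e'],
   ['w'], ['w','o'], ['w','o','o'], ['m'], ['m','a']]

lemma mem_P_of_append (child : List Char) (c : Char)
    (h : child ++ [c] ∈ P) : child ∈ P := by
  have hd : child = (child ++ [c]).dropLast := by simp
  simp only [P, List.mem_cons, List.not_mem_nil, or_false] at h
  rcases h with h|h|h|h|h|h|h|h|h|h|h <;>
    (rw [h] at hd; simp at hd; simp [P, hd])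

lemma dead_foldl (s : List Char) : ∀ child, child ∉ P →
    List.foldl stepA child s ∉ P := by
  induction s with
  | nil => intro child h; simpa using h
  | cons c rest ih =>
    intro child h
    have hstep : stepA child c = child ++ [c] := by
      unfold stepA
      have : child ++ [c] ∉ [['a','y','a'], ['y','e'], ['w','o','o'], ['m','a']] := by
        intro hm
        exact h (mem_P_of_append child c (by
          simp only [P, List.mem_cons, List.not_mem_nil, or_false]
          simp only [List.mem_cons, List.not_mem_nil, or_false] at hm
          tauto))
      simp [this]
    have : child ++ [c] ∉ P := fun hm => h (mem_P_of_append child c hm)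
    simpa [hstep] using ih (child ++ [c]) this

lemma dead_ne_nil (s : List Char) (child : List Char) (h : child ∉ P) :
    List.foldl stepA child s ≠ [] := by
  intro hnil
  exact dead_foldl s child h (by rw [hnil]; simp [P])

lemma main_lemma : ∀ (s : List Char),
    (List.foldl stepA [] s = []) ↔ okB s = true := by
  suffices H : ∀ (n : Nat) (s : List Char), s.length ≤ n →
      ((List.foldl stepA [] s = []) ↔ okB s = true) from
    fun s => H s.length s le_rfl
  intro n
  induction n with
  | zero =>
    intro s hs
    have : s = [] := List.eq_nil_of_length_eq_zero (Nat.le_zero.mp hs)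
    subst this; simp [okB]
  | succ n ih =>
    intro s hs
    match s, hs with
    | [], _ => simp [okB]
    | [c], _ => simp [okB, stepA]
    | [c, d], hs =>
      rw [okB]
      split_ifs with h1 h2 h3 h4
      · simp at h1
      · simp only [List.take, List.cons.injEq] at h2
        obtain ⟨rfl, rfl, -⟩ := h2
        simp [stepA, okB]
      · simp at h3
      · simp only [List.take, List.cons.injEq] at h4
        obtain ⟨rfl, rfl, -⟩ := h4
        simp [stepA, okB]
      · have hcd : [c, d] ∉ ([['a','y','a'], ['y','e'], ['w','o','o'], ['m','a']] : List (List Char)) := by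
          intro hm
          simp at hm h2 h4
          tauto
        simp [stepA, hcd]
    | c :: d :: e :: r, hs =>
      rw [okB]
      have hr3 : r.length + 3 ≤ n + 1 := by simpa using hs
      split_ifs with h1 h2 h3 h4
      · -- "aya" at the front
        simp only [List.take, List.cons.injEq] at h1
        obtain ⟨rfl, rfl, rfl, -⟩ := h1
        have hpre : List.foldl stepA [] ('a'::'y'::'a'::r) = List.foldl stepA [] r := by
          simp [stepA]
        rw [hpre]
        simpa using ih r (by omega)
      · -- "ye" at the front
        simp only [List.take, List.cons.injEq] at h2
        obtain ⟨rfl, rfl, -⟩ := h2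
        have hpre : List.foldl stepA [] ('y'::'e'::e::r) = List.foldl stepA [] (e::r) := by
          simp [stepA]
        rw [hpre]
        simpa using ih (e::r) (by simp; omega)
      · -- "woo" at the front
        simp only [List.take, List.cons.injEq] at h3
        obtain ⟨rfl, rfl, rfl, -⟩ := h3
        have hpre : List.foldl stepA [] ('w'::'o'::'o'::r) = List.foldl stepA [] r := by
          simp [stepA]
        rw [hpre]
        simpa using ih r (by omega)
      · -- "ma" at the front
        simp only [List.take, List.cons.injEq] at h4
        obtain ⟨rfl, rfl, -⟩ := h4
        have hpre : List.foldl stepA [] ('m'::'a'::e::r) = List.foldl stepA [] (e::r) := by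
          simp [stepA]
        rw [hpre]
        simpa using ih (e::r) (by simp; omega)
      · -- no word matches at the front: the greedy scan dies too
        have hne : List.foldl stepA [] (c::d::e::r) ≠ [] := by
          by_cases hc : c = 'a'
          · subst hc
            by_cases hd : d = 'y'
            · subst hd
              have he : e ≠ 'a' := by rintro rfl; exact h1 (by simp)
              have hpre : List.foldl stepA [] ('a'::'y'::e::r)
                  = List.foldl stepA ['a','y',e] r := by simp [stepA, he]
              rw [hpre]; exact dead_ne_nil r _ (by simp [P, he])
            · have hpre : List.foldl stepA [] ('a'::d::e::r)
                  = List.foldl stepA ['a',d] (e::r) := by simp [stepA, hd]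
              rw [hpre]; exact dead_ne_nil _ _ (by simp [P, hd])
          · by_cases hy : c = 'y'
            · subst hy
              have hd : d ≠ 'e' := by rintro rfl; exact h2 (by simp)
              have hpre : List.foldl stepA [] ('y'::d::e::r)
                  = List.foldl stepA ['y',d] (e::r) := by simp [stepA, hd]
              rw [hpre]; exact dead_ne_nil _ _ (by simp [P, hd])
            · by_cases hw : c = 'w'
              · subst hw
                by_cases hd : d = 'o'
                · subst hd
                  have he : e ≠ 'o' := by rintro rfl; exact h3 (by simp)
                  have hpre : List.foldl stepA [] ('w'::'o'::e::r)
                      = List.foldl stepA ['w','o',e] r := by simp [stepA, he]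
                  rw [hpre]; exact dead_ne_nil r _ (by simp [P, he])
                · have hpre : List.foldl stepA [] ('w'::d::e::r)
                      = List.foldl stepA ['w',d] (e::r) := by simp [stepA, hd]
                  rw [hpre]; exact dead_ne_nil _ _ (by simp [P, hd])
              · by_cases hm : c = 'm'
                · subst hm
                  have hd : d ≠ 'a' := by rintro rfl; exact h4 (by simp)
                  have hpre : List.foldl stepA [] ('m'::d::e::r)
                      = List.foldl stepA ['m',d] (e::r) := by simp [stepA, hd]
                  rw [hpre]; exact dead_ne_nil _ _ (by simp [P, hd])
                · have hpre : List.foldl stepA [] (c::d::e::r)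
                      = List.foldl stepA [c] (d::e::r) := by simp [stepA, hc, hy, hw, hm]
                  rw [hpre]
                  exact dead_ne_nil _ _ (by simp [P, hc, hy, hw, hm])
        simp only [iff_false]
        exact hne

-- count over the outer loop: A's accumulator fold equals a + (#words B accepts)
lemma count_lemma : ∀ (l : List String) (a : Int),
    List.foldl (fun answer sounds =>
      if (sounds.toList.foldl stepA []).length = 0 then answer + 1 else answer) a l
      = a + ((l.filter (fun s => okB s.toList)).length : Int) := by
  intro l
  induction l with
  | nil => intro a; simp
  | cons x xs ih =>
    intro a
    rw [List.foldl_cons, List.filter_cons]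
    by_cases h : okB x.toList = true
    · have hz : (x.toList.foldl stepA []).length = 0 := by
        rw [List.length_eq_zero_iff, main_lemma]; exact h
      rw [if_pos hz, ih]
      simp [h]
      omega
    · have hz : ¬ (x.toList.foldl stepA []).length = 0 := by
        rw [List.length_eq_zero_iff, main_lemma]; exact h
      rw [if_neg hz, ih]
      simp [h]

-- ===== VERDICT (by name: the statement is the Claim_ definition above) =====
theorem solution_spec : Claim_equal_solution := by
  intro babbling _
  show solution babbling = solution_alt babbling
  unfold solution solution_alt
  rw [count_lemma]
  simp
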